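-- pv_equiv track=rewrite | github.com/Bedo130702/Bedo130702 | Python/Sequence_Series.py | isSeries
-- ===== SOURCE A (Python) =====
-- def isSeries(n):
--     sum=1
--     term=0
--     for i in range(n):
--         if i==0 or i==1:
--             sum=sum+term+i
--             term+=1
--         else:
--             term+=3*(2*i-1)
--             sum+=term
--     return sum
-- ===== SOURCE B (Python) =====
-- def isSeries(n):
--     # closed form: after the two seed steps, term(i) = 3*i*i - 1, so the sum telescopes
--     if n <= 0:
--         return 1
--     return (n - 1) * n * (2 * n - 1) // 2 + 2 - n
-- ===== Notes on version B (the rewrite author's own statement) =====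
-- stated objective: faster
-- what changed: Replaced the O(n) accumulation loop with an O(1) closed-form polynomial (term(i)=3*i*i-1 summed telescopically).
import Mathlib
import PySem

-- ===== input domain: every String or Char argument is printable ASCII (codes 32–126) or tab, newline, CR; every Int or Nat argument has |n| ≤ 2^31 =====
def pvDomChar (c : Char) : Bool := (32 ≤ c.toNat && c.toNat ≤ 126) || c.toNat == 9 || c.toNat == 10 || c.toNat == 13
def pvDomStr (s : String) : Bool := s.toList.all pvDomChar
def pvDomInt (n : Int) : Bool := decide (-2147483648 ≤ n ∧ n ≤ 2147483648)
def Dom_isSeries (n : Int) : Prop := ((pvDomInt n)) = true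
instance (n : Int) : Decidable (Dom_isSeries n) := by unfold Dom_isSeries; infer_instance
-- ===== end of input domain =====

-- B replaces A's O(n) accumulation loop with an O(1) closed-form polynomial; return values proved equal for every Int.

-- ===== PORT A =====
-- loop body of A: state (sum, term), index i
def pvStepA (st : Int × Int) (i : Int) : Int × Int :=
  if i == 0 || i == 1 then (st.1 + st.2 + i, st.2 + 1)
  else (st.1 + (st.2 + 3 * (2 * i - 1)), st.2 + 3 * (2 * i - 1))

def isSeries (n : Int) : Int :=
  ((PySem.List.pyRange 0 n 1).foldl pvStepA (1, 0)).1

-- ===== PORT B =====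
def isSeries_alt (n : Int) : Int :=
  if n ≤ 0 then 1
  else PySem.Int.floordiv ((n - 1) * n * (2 * n - 1)) 2 + 2 - n

-- ===== PRECONDITION & SPEC =====
def Spec_isSeries (n : Int) (out : Int) : Prop := out = isSeries_alt n
instance (n : Int) (out : Int) : Decidable (Spec_isSeries n out) := by unfold Spec_isSeries; infer_instance

-- ===== CLAIM (what is proved, stated in full; the proofs are below) =====
def Claim_equal_isSeries : Prop := ∀ (n : Int), Dom_isSeries n → Spec_isSeries n (isSeries n)

-- ===== LEMMAS AND PROOFS =====

-- loop invariant: after m ≥ 2 iterations, 2*sum = (m-1)m(2m-1)+4-2m and term = 3(m-1)^2-1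
theorem pv_loop_inv (m : Nat) (hm : 2 ≤ m) :
    2 * ((PySem.List.pyRange 0 (m : Int) 1).foldl pvStepA (1, 0)).1
        = ((m : Int) - 1) * m * (2 * m - 1) + 4 - 2 * m
    ∧ ((PySem.List.pyRange 0 (m : Int) 1).foldl pvStepA (1, 0)).2
        = 3 * ((m : Int) - 1) ^ 2 - 1 := by
  induction m with
  | zero => omega
  | succ m ih =>
    rcases Nat.lt_or_ge m 2 with h2 | h2
    · interval_cases m
      · omega
      · constructor <;> decide
    · obtain ⟨hs, ht⟩ := ih h2
      have hcast : ((m + 1 : Nat) : Int) = (m : Int) + 1 := by push_cast; ring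
      have hsplit : PySem.List.pyRange 0 ((m : Int) + 1) 1
          = PySem.List.pyRange 0 (m : Int) 1 ++ [(m : Int)] :=
        PySem.List.pyRange_one_succ_right (by positivity)
      have hne0 : ((m : Int) == 0) = false := by
        simp; omega
      have hne1 : ((m : Int) == 1) = false := by
        simp; omega
      rw [hcast, hsplit, List.foldl_append]
      constructor
      · simp only [List.foldl, pvStepA, hne0, hne1, Bool.or_self, if_neg Bool.false_ne_true]
        linear_combination hs + 2 * ht
      · simp only [List.foldl, pvStepA, hne0, hne1, Bool.or_self, if_neg Bool.false_ne_true]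
        linear_combination ht

-- ===== VERDICT (by name: the statement is the Claim_ definition above) =====
theorem isSeries_spec : Claim_equal_isSeries := by
  intro n _
  unfold Spec_isSeries isSeries isSeries_alt
  by_cases hle : n ≤ 0
  · rw [PySem.List.pyRange_one_eq_nil hle]
    simp [hle]
  · by_cases h2 : 2 ≤ n
    · have hn : n = ((n.toNat : Nat) : Int) := by omega
      have hm2 : 2 ≤ n.toNat := by omega
      obtain ⟨hs, _⟩ := pv_loop_inv n.toNat hm2
      rw [← hn] at hs
      have hE : (n - 1) * n * (2 * n - 1)
          = 2 * (((PySem.List.pyRange 0 n 1).foldl pvStepA (1, 0)).1 - 2 + n) := by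
        linear_combination -hs
      rw [if_neg (by omega), hE]
      rw [show PySem.Int.floordiv (2 * (((PySem.List.pyRange 0 n 1).foldl pvStepA (1, 0)).1 - 2 + n)) 2
            = ((PySem.List.pyRange 0 n 1).foldl pvStepA (1, 0)).1 - 2 + n from by
        simp [PySem.Int.floordiv]]
      ring
    · have : n = 1 := by omega
      subst this; decide
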